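-- pv_equiv track=rewrite | github.com/mahdavireza/G | 3.py | insert_chars
-- ===== SOURCE A (Python) =====
-- def insert_chars(input_str, big_char, small_char):
--     output_str = ""
--     for i, char in enumerate(input_str):
--         output_str += char
--         if i%2 == 0:
--             output_str += big_char
--         else:
--             output_str += small_char
--
--     return output_str
-- ===== SOURCE B (Python) =====
-- def insert_chars(input_str, big_char, small_char):
--     parts = []
--     for j in range(0, len(input_str), 2):
--         parts.append(input_str[j] + big_char)
--         if j + 1 < len(input_str):
--             parts.append(input_str[j + 1] + small_char)
--     return "".join(parts)
-- ===== Notes on version B (the rewrite author's own statement) =====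
-- stated objective: alternative
-- what changed: Replaces the per-character loop with an i%2 branch and repeated string += by a stride-2 loop that emits both marked pieces per iteration into a list joined once at the end.
import Mathlib
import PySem

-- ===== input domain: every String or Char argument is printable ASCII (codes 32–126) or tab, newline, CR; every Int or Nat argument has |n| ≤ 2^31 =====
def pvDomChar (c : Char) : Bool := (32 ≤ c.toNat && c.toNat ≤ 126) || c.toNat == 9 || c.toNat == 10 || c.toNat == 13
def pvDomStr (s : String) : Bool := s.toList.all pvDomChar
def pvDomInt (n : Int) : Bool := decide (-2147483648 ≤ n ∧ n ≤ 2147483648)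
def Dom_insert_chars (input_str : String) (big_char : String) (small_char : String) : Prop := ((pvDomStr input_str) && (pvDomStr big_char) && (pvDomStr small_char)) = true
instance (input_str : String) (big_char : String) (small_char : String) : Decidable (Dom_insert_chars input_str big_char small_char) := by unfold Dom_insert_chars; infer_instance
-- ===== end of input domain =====

-- B changes the decomposition: a stride-2 pass emitting both markers per step, joined once (same cost), instead of A's per-index i%2 branch with repeated concatenation.

-- ===== PORT A =====
-- A: for i, char in enumerate(input_str): output += char; output += big if i%2==0 else small
def insert_chars (input_str : String) (big_char : String) (small_char : String) : String :=
  String.mk ((PySem.List.enumerate input_str.toList 0).foldl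
    (fun acc p =>
      acc ++ p.2 :: (if PySem.Int.mod p.1 2 = 0 then big_char.toList else small_char.toList)) [])

-- ===== PORT B =====
-- B: stride-2 recursion — each step consumes up to two characters and appends both marked pieces.
def insertCharsGo (big small : List Char) : List Char → List Char
  | [] => []
  | [c] => c :: big
  | c :: d :: rest => (c :: big) ++ (d :: small) ++ insertCharsGo big small rest

def insert_chars_alt (input_str : String) (big_char : String) (small_char : String) : String :=
  String.mk (insertCharsGo big_char.toList small_char.toList input_str.toList)

-- ===== PRECONDITION & SPEC =====
def Spec_insert_chars (input_str : String) (big_char : String) (small_char : String) (out : String) : Prop := out = insert_chars_alt input_str big_char small_char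
instance (input_str : String) (big_char : String) (small_char : String) (out : String) : Decidable (Spec_insert_chars input_str big_char small_char out) := by unfold Spec_insert_chars; infer_instance

-- ===== CLAIM (what is proved, stated in full; the proofs are below) =====
def Claim_equal_insert_chars : Prop := ∀ (input_str : String) (big_char : String) (small_char : String), Dom_insert_chars input_str big_char small_char → Spec_insert_chars input_str big_char small_char (insert_chars input_str big_char small_char)

-- ===== LEMMAS AND PROOFS =====
lemma insert_chars_mod_even (m : Nat) : PySem.Int.mod (2 * (m : Int)) 2 = 0 := by
  rw [PySem.Int.mod_eq_zero_iff_dvd]; exact ⟨m, rfl⟩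

lemma insert_chars_mod_odd (m : Nat) : PySem.Int.mod (2 * (m : Int) + 1) 2 ≠ 0 := by
  rw [PySem.Int.mod_eq_emod_of_pos (by omega)]; omega

lemma insert_chars_fold_eq (big small : List Char) :
    ∀ (cs : List Char) (m : Nat) (acc : List Char),
    (PySem.List.enumerate cs (2 * (m : Int))).foldl
      (fun acc p => acc ++ p.2 :: (if PySem.Int.mod p.1 2 = 0 then big else small)) acc
      = acc ++ insertCharsGo big small cs
  | [], m, acc => by simp [PySem.List.enumerate_nil, insertCharsGo]
  | [c], m, acc => by
      simp [PySem.List.enumerate_cons, PySem.List.enumerate_nil, insertCharsGo]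
  | c :: d :: rest, m, acc => by
      have h2 : (2 * (m : Int) + 1) + 1 = 2 * ((m + 1 : Nat) : Int) := by push_cast; ring
      rw [PySem.List.enumerate_cons, PySem.List.enumerate_cons, h2]
      simp only [List.foldl_cons, insert_chars_mod_even m, if_neg (insert_chars_mod_odd m)]
      rw [insert_chars_fold_eq big small rest (m + 1)]
      simp [insertCharsGo]

-- ===== VERDICT (by name: the statement is the Claim_ definition above) =====
theorem insert_chars_spec : Claim_equal_insert_chars := by
  intro s b c _
  unfold Spec_insert_chars insert_chars insert_chars_alt
  have h := insert_chars_fold_eq b.toList c.toList s.toList 0 []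
  simp only [Nat.cast_zero, mul_zero, List.nil_append] at h
  exact congrArg String.mk h
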